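-- pv_equiv track=rewrite | github.com/alphabetatester808/entropy-docs-chatbot | app.py | prepare_entropy_context
-- ===== SOURCE A (Python) =====
-- from typing import Dict, List
--
-- def prepare_entropy_context(documents: Dict[str, str]) -> str:
--     if not documents:
--         return ""
--
--     critical_files = []
--     ashlar_files = []
--     general_files = []
--
--     for file_path, content in documents.items():
--         file_lower = file_path.lower()
--         if any(critical in file_lower for critical in ['readme', 'getting-started', 'quickstart']):
--             critical_files.append((file_path, content))
--         elif any(ashlar in file_lower for ashlar in ['ashlar', 'mining', 'device']):
--             ashlar_files.append((file_path, content))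
--         else:
--             general_files.append((file_path, content))
--
--     all_files = critical_files + ashlar_files + general_files
--     context_parts = []
--     current_chars = 0
--     max_chars = 150000
--
--     for file_path, content in all_files:
--         file_section = f"=== {file_path} ===\n{content}\n\n"
--
--         if current_chars + len(file_section) < max_chars:
--             context_parts.append(file_section)
--             current_chars += len(file_section)
--         else:
--             break
--
--     return "\n".join(context_parts)
-- ===== SOURCE B (Python) =====
-- def prepare_entropy_context(documents):
--     def priority(item):
--         path = item[0].lower()
--         if any(k in path for k in ('readme', 'getting-started', 'quickstart')):
--             return 0
--         if any(k in path for k in ('ashlar', 'mining', 'device')):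
--             return 1
--         return 2
--
--     parts = []
--     budget = 150000
--     for file_path, content in sorted(documents.items(), key=priority):
--         section = f"=== {file_path} ===\n{content}\n\n"
--         if len(section) >= budget:
--             break
--         budget -= len(section)
--         parts.append(section)
--     return "\n".join(parts)
-- ===== Notes on version B (the rewrite author's own statement) =====
-- stated objective: simpler
-- what changed: Replaces the three explicit category buckets plus list concatenation by one stable sort under a 0/1/2 priority key, drops the redundant empty-dict guard, and runs the budget loop with a remaining-budget countdown instead of an upward character counter.
import Mathlib
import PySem

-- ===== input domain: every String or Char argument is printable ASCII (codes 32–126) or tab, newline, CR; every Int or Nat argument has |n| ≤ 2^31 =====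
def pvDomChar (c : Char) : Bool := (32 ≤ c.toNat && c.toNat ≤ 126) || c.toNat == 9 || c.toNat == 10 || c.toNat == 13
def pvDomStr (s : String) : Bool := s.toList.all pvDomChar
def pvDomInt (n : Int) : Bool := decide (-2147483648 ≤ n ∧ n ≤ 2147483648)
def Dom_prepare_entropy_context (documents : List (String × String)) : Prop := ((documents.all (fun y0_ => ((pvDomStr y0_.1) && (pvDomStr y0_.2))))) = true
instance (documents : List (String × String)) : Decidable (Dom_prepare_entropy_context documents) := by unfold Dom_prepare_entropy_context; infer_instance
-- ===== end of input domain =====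

-- B replaces A's three explicit buckets + concatenation by one stable sort under a priority
-- key, and counts the budget down instead of up (objective: simpler).

-- ===== PORT A =====

-- shared helper: the f-string "=== {file_path} ===\n{content}\n\n"
def pvSection (p : String × String) : String :=
  PySem.Str.join "" ["=== ", p.1, " ===\n", p.2, "\n\n"]

-- any(k in fl for k in kws)
def pvAnyIn (kws : List String) (fl : String) : Bool :=
  kws.any (fun k => PySem.Str.isIn k fl)

-- A's second loop: append sections while current_chars + len < 150000, break otherwise
def pvLoopA : List (String × String) → List String → Int → List String
  | [], parts, _ => parts
  | p :: rest, parts, cur =>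
    let sec := pvSection p
    if cur + PySem.Str.len sec < 150000 then
      pvLoopA rest (parts ++ [sec]) (cur + PySem.Str.len sec)
    else parts

def prepare_entropy_context (documents : List (String × String)) : String :=
  if documents.isEmpty then "" else
  let buckets := documents.foldl
    (fun (b : List (String × String) × List (String × String) × List (String × String)) p =>
      let fl := PySem.Str.lower p.1
      if pvAnyIn ["readme", "getting-started", "quickstart"] fl then
        (b.1 ++ [p], b.2.1, b.2.2)
      else if pvAnyIn ["ashlar", "mining", "device"] fl then
        (b.1, b.2.1 ++ [p], b.2.2)
      else
        (b.1, b.2.1, b.2.2 ++ [p]))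
    ([], [], [])
  let all_files := buckets.1 ++ buckets.2.1 ++ buckets.2.2
  PySem.Str.join "\n" (pvLoopA all_files [] 0)

-- ===== PORT B =====

-- B's priority key: 0 critical, 1 ashlar, 2 general
def pvPriority (item : String × String) : Int :=
  let path := PySem.Str.lower item.1
  if pvAnyIn ["readme", "getting-started", "quickstart"] path then 0
  else if pvAnyIn ["ashlar", "mining", "device"] path then 1
  else 2

-- B's loop: keep a remaining budget, break when the section no longer fits
def pvLoopB : List (String × String) → Int → List String
  | [], _ => []
  | p :: rest, budget =>
    let sec := pvSection p
    if PySem.Str.len sec ≥ budget then []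
    else sec :: pvLoopB rest (budget - PySem.Str.len sec)

def prepare_entropy_context_alt (documents : List (String × String)) : String :=
  PySem.Str.join "\n" (pvLoopB (PySem.List.sorted documents pvPriority) 150000)

-- ===== PRECONDITION & SPEC =====
def Spec_prepare_entropy_context (documents : List (String × String)) (out : String) : Prop := out = prepare_entropy_context_alt documents
instance (documents : List (String × String)) (out : String) : Decidable (Spec_prepare_entropy_context documents out) := by unfold Spec_prepare_entropy_context; infer_instance

-- ===== CLAIM (what is proved, stated in full; the proofs are below) =====
def Claim_equal_prepare_entropy_context : Prop := ∀ (documents : List (String × String)), Dom_prepare_entropy_context documents → Spec_prepare_entropy_context documents (prepare_entropy_context documents)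

-- ===== LEMMAS AND PROOFS =====

-- inserting x into a list split at exactly its key position lands it right there (stability)
theorem pv_insertBy_mid {α : Type} (key : α → Int) (x : α) (c g : List α)
    (hc : ∀ y ∈ c, ¬ key x < key y) (hg : ∀ y ∈ g, key x < key y) :
    PySem.List.insertBy (fun a b => decide (key a < key b)) x (c ++ g) = c ++ x :: g := by
  induction c with
  | nil =>
    cases g with
    | nil => rfl
    | cons y ys =>
      simp [PySem.List.insertBy, hg y (by simp)]
  | cons a c' ih =>
    have ha : ¬ key x < key a := hc a (by simp)
    simp only [List.cons_append, PySem.List.insertBy, decide_eq_true_eq, if_neg ha]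
    simp [ih (fun y hy => hc y (by simp [hy]))]

-- priority takes only the values 0, 1, 2
theorem pv_priority_cases (p : String × String) :
    pvPriority p = 0 ∨ pvPriority p = 1 ∨ pvPriority p = 2 := by
  by_cases h0 : pvAnyIn ["readme", "getting-started", "quickstart"] (PySem.Str.lower p.1) = true
  · left; simp [pvPriority, h0]
  · by_cases h1 : pvAnyIn ["ashlar", "mining", "device"] (PySem.Str.lower p.1) = true
    · right; left; simp [pvPriority, h0, h1]
    · right; right; simp [pvPriority, h0, h1]

-- the stable sort under pvPriority is the three filter buckets in order
theorem pv_sorted_foldl (xs : List (String × String))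
    (c m g : List (String × String))
    (hc : ∀ y ∈ c, pvPriority y = 0) (hm : ∀ y ∈ m, pvPriority y = 1)
    (hg : ∀ y ∈ g, pvPriority y = 2) :
    xs.foldl (fun acc x => PySem.List.insertBy (fun a b => decide (pvPriority a < pvPriority b)) x acc)
      (c ++ m ++ g)
    = (c ++ xs.filter (fun p => pvPriority p == 0))
      ++ (m ++ xs.filter (fun p => pvPriority p == 1))
      ++ (g ++ xs.filter (fun p => pvPriority p == 2)) := by
  induction xs generalizing c m g with
  | nil => simp
  | cons x rest ih =>
    rcases pv_priority_cases x with h | h | h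
    · have hins : PySem.List.insertBy (fun a b => decide (pvPriority a < pvPriority b)) x (c ++ m ++ g)
          = (c ++ [x]) ++ m ++ g := by
        rw [List.append_assoc]
        rw [pv_insertBy_mid pvPriority x c (m ++ g)
          (fun y hy => by rw [h, hc y hy]; omega)
          (fun y hy => by rcases List.mem_append.1 hy with hy | hy
                          · rw [h, hm y hy]; omega
                          · rw [h, hg y hy]; omega)]
        simp
      simp only [List.foldl_cons, hins]
      rw [ih (c ++ [x]) m g
        (fun y hy => by rcases List.mem_append.1 hy with hy | hy
                        · exact hc y hy
                        · simp at hy; subst hy; exact h)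
        hm hg]
      simp [h]
    · have hins : PySem.List.insertBy (fun a b => decide (pvPriority a < pvPriority b)) x (c ++ m ++ g)
          = c ++ (m ++ [x]) ++ g := by
        have : c ++ m ++ g = (c ++ m) ++ g := by simp
        rw [this, pv_insertBy_mid pvPriority x (c ++ m) g
          (fun y hy => by rcases List.mem_append.1 hy with hy | hy
                          · rw [h, hc y hy]; omega
                          · rw [h, hm y hy]; omega)
          (fun y hy => by rw [h, hg y hy]; omega)]
        simp
      simp only [List.foldl_cons, hins]
      rw [ih c (m ++ [x]) g hc
        (fun y hy => by rcases List.mem_append.1 hy with hy | hy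
                        · exact hm y hy
                        · simp at hy; subst hy; exact h)
        hg]
      simp [h]
    · have hins : PySem.List.insertBy (fun a b => decide (pvPriority a < pvPriority b)) x (c ++ m ++ g)
          = c ++ m ++ (g ++ [x]) := by
        rw [← List.append_assoc,
          PySem.List.insertBy_of_forall_not_before _ x (c ++ m ++ g)
          (fun y hy => by
            simp only [decide_eq_false_iff_not]
            rcases List.mem_append.1 hy with hy | hy
            · rcases List.mem_append.1 hy with hy | hy
              · rw [h, hc y hy]; omega
              · rw [h, hm y hy]; omega
            · rw [h, hg y hy]; omega)]
      simp only [List.foldl_cons, hins]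
      rw [ih c m (g ++ [x]) hc hm
        (fun y hy => by rcases List.mem_append.1 hy with hy | hy
                        · exact hg y hy
                        · simp at hy; subst hy; exact h)]
      simp [h]

-- A's bucket foldl computes the same three filters
theorem pv_buckets_eq (xs : List (String × String))
    (c m g : List (String × String)) :
    xs.foldl
      (fun (b : List (String × String) × List (String × String) × List (String × String)) p =>
        let fl := PySem.Str.lower p.1
        if pvAnyIn ["readme", "getting-started", "quickstart"] fl then
          (b.1 ++ [p], b.2.1, b.2.2)
        else if pvAnyIn ["ashlar", "mining", "device"] fl then
          (b.1, b.2.1 ++ [p], b.2.2)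
        else
          (b.1, b.2.1, b.2.2 ++ [p]))
      (c, m, g)
    = (c ++ xs.filter (fun p => pvPriority p == 0),
       m ++ xs.filter (fun p => pvPriority p == 1),
       g ++ xs.filter (fun p => pvPriority p == 2)) := by
  induction xs generalizing c m g with
  | nil => simp
  | cons x rest ih =>
    simp only [List.foldl_cons, List.filter_cons]
    by_cases h0 : pvAnyIn ["readme", "getting-started", "quickstart"] (PySem.Str.lower x.1) = true
    · have hp : pvPriority x = 0 := by unfold pvPriority; simp [h0]
      simp [h0, hp, ih]
    · by_cases h1 : pvAnyIn ["ashlar", "mining", "device"] (PySem.Str.lower x.1) = true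
      · have hp : pvPriority x = 1 := by unfold pvPriority; simp [h0, h1]
        simp [h0, h1, hp, ih]
      · have hp : pvPriority x = 2 := by unfold pvPriority; simp [h0, h1]
        simp [h0, h1, hp, ih]

-- the two budget loops agree: counting up to 150000 = counting the remainder down
theorem pv_loops_eq (l : List (String × String)) (parts : List String) (cur : Int) :
    pvLoopA l parts cur = parts ++ pvLoopB l (150000 - cur) := by
  induction l generalizing parts cur with
  | nil => simp [pvLoopA, pvLoopB]
  | cons p rest ih =>
    simp only [pvLoopA, pvLoopB]
    by_cases h : cur + PySem.Str.len (pvSection p) < 150000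
    · rw [if_pos h, if_neg (by omega), ih]
      have h2 : 150000 - (cur + PySem.Str.len (pvSection p))
           = 150000 - cur - PySem.Str.len (pvSection p) := by omega
      rw [h2]
      simp only [List.append_assoc, List.singleton_append]
    · rw [if_neg h, if_pos (by omega)]
      simp

theorem pv_sorted_eq_buckets (xs : List (String × String)) :
    PySem.List.sorted xs pvPriority
    = xs.filter (fun p => pvPriority p == 0)
      ++ xs.filter (fun p => pvPriority p == 1)
      ++ xs.filter (fun p => pvPriority p == 2) := by
  rw [PySem.List.sorted_eq_foldl_insertBy]
  have := pv_sorted_foldl xs [] [] [] (by simp) (by simp) (by simp)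
  simpa using this

-- ===== VERDICT (by name: the statement is the Claim_ definition above) =====
theorem prepare_entropy_context_spec : Claim_equal_prepare_entropy_context := by
  intro documents _
  show prepare_entropy_context documents = prepare_entropy_context_alt documents
  unfold prepare_entropy_context prepare_entropy_context_alt
  cases documents with
  | nil => rfl
  | cons d ds =>
    rw [if_neg (by simp)]
    rw [pv_buckets_eq (d :: ds) [] [] [], pv_sorted_eq_buckets (d :: ds)]
    simp only [List.nil_append]
    rw [pv_loops_eq]
    norm_num
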